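-- pv_equiv track=rewrite | github.com/Subhransu27062007/GitHub-Analyzer | backend/processing.py | _pick_samples
-- ===== SOURCE A (Python) =====
-- def _pick_samples(messages: list[str], n: int = 3) -> list[str]:
--     """
--     Pick up to n representative commit messages.
--     Prefers longer, more descriptive messages over very short ones.
--     """
--     ranked = sorted(messages, key=len, reverse=True)
--     seen   = set()
--     picked = []
--     for msg in ranked:
--         normalised = msg.lower().strip()
--         if normalised not in seen:
--             seen.add(normalised)
--             picked.append(msg[:80])   # truncate to 80 chars
--         if len(picked) == n:
--             break
--     return picked
-- ===== SOURCE B (Python) =====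
-- def _pick_samples(messages: list[str], n: int = 3) -> list[str]:
--     # Group by normalised text, keeping for each group the longest message
--     # (earliest wins on equal length), then sort only the representatives.
--     best = {}
--     for i, msg in enumerate(messages):
--         key = msg.lower().strip()
--         cur = best.get(key)
--         if cur is None or len(cur[0]) < len(msg):
--             best[key] = (msg, i)
--     reps = sorted(best.values(), key=lambda t: (-len(t[0]), t[1]))
--     picked = []
--     for msg, _ in reps:
--         picked.append(msg[:80])
--         if len(picked) == n:
--             break
--     return picked
-- ===== Notes on version B (the rewrite author's own statement) =====
-- stated objective: alternative
-- what changed: B replaces A's sort-all-messages-then-scan-with-a-seen-set by a single dict pass that keeps one representative per normalised key (longest message, earliest on equal length, with its original index) and then sorts only those representatives by (-length, index), feeding them to the same truncate-and-break pick loop.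
import Mathlib
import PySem

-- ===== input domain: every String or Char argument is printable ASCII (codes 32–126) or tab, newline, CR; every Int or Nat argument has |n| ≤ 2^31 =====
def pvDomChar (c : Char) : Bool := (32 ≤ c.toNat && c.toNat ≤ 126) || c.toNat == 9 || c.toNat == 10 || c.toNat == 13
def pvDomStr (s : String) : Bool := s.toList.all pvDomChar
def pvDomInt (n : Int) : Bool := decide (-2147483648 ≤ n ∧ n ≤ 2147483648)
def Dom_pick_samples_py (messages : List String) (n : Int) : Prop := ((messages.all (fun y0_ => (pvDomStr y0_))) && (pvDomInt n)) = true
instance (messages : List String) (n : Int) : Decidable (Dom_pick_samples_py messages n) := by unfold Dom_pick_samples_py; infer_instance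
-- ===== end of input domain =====

-- B groups the messages by normalised text in one dict pass (keeping the longest message per
-- group, earliest on equal length, together with its index) and sorts only those
-- representatives, instead of A's sort-everything-then-scan-with-a-seen-set.

-- shared helpers: msg.lower().strip() and msg[:80], computed verbatim by both Pythons
def normKey (m : String) : String := PySem.Str.strip (PySem.Str.lower m)
def trunc80 (m : String) : String := PySem.Str.slice m none (some 80)

-- ===== PORT A =====
-- the for-loop over ranked with `seen`/`picked` and the break on len(picked) == n
def pickLoopA (n : Int) : List String → PySem.Set String → List String → List String
  | [], _seen, picked => picked
  | msg :: rest, seen, picked =>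
    if PySem.Set.contains seen (normKey msg) = false then
      let picked' := picked ++ [trunc80 msg]
      if (picked'.length : Int) = n then picked'
      else pickLoopA n rest (PySem.Set.add seen (normKey msg)) picked'
    else
      if (picked.length : Int) = n then picked else pickLoopA n rest seen picked

def pick_samples_py (messages : List String) (n : Int) : List String :=
  pickLoopA n (PySem.List.sorted messages (fun m => PySem.Str.len m) true) PySem.Set.empty []

-- ===== PORT B =====
-- one step of B's dict-building pass: best[key] = (msg, i) when the key is new or msg strictly longer
def bestStep (best : PySem.Dict String (String × Int)) (p : Int × String) :
    PySem.Dict String (String × Int) :=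
  match best.get? (normKey p.2) with
  | none => best.insert (normKey p.2) (p.2, p.1)
  | some cur =>
    if PySem.Str.len cur.1 < PySem.Str.len p.2 then best.insert (normKey p.2) (p.2, p.1) else best

-- B's for-loop over reps with the break on len(picked) == n
def pickLoopB (n : Int) : List (String × Int) → List String → List String
  | [], picked => picked
  | t :: rest, picked =>
    let picked' := picked ++ [trunc80 t.1]
    if (picked'.length : Int) = n then picked' else pickLoopB n rest picked'

def pick_samples_py_alt (messages : List String) (n : Int) : List String :=
  let best := (PySem.List.enumerate messages).foldl bestStep PySem.Dict.empty
  let reps := PySem.List.sorted2 best.values (fun t => -(PySem.Str.len t.1)) (fun t => t.2) false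
  pickLoopB n reps []

-- ===== PRECONDITION & SPEC =====
def Spec_pick_samples_py (messages : List String) (n : Int) (out : List String) : Prop := out = pick_samples_py_alt messages n
instance (messages : List String) (n : Int) (out : List String) : Decidable (Spec_pick_samples_py messages n out) := by unfold Spec_pick_samples_py; infer_instance

-- ===== CLAIM (what is proved, stated in full; the proofs are below) =====
def Claim_equal_pick_samples_py : Prop := ∀ (messages : List String) (n : Int), Dom_pick_samples_py messages n → Spec_pick_samples_py messages n (pick_samples_py messages n)

-- ===== LEMMAS AND PROOFS =====

-- proof-side vocabulary ------------------------------------------------------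

-- the (message, original index) pairs
def pairsP (messages : List String) : List (String × Int) :=
  (PySem.List.enumerate messages).map (fun e => (e.2, e.1))

-- single integer key realising the lexicographic order (-len, index) for 0 ≤ index ≤ N
def keyI (N : Int) (p : String × Int) : Int := -(PySem.Str.len p.1) * (N + 1) + p.2

-- the comparator of A's reverse sort, the keyI comparator, and sorted2's comparator
def cRev (a b : String) : Bool := decide (PySem.Str.len b < PySem.Str.len a)
def cK (N : Int) (p q : String × Int) : Bool := decide (keyI N p < keyI N q)
def c2 (p q : String × Int) : Bool :=
  decide (-(PySem.Str.len p.1) < -(PySem.Str.len q.1)) ||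
  (!decide (-(PySem.Str.len q.1) < -(PySem.Str.len p.1)) && decide (p.2 < q.2))

-- first occurrence per normalised key (what A's seen-set mechanism keeps)
def firstOccs (seen : PySem.Set String) : List String → List String
  | [] => []
  | m :: rest =>
    if PySem.Set.contains seen (normKey m) then firstOccs seen rest
    else m :: firstOccs (PySem.Set.add seen (normKey m)) rest

-- the same on (message, index) pairs
def dedupP (seen : PySem.Set String) : List (String × Int) → List (String × Int)
  | [] => []
  | p :: rest =>
    if PySem.Set.contains seen (normKey p.1) then dedupP seen rest
    else p :: dedupP (PySem.Set.add seen (normKey p.1)) rest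

-- the common pick loop, on bare strings
def pickLoopC (n : Int) : List String → List String → List String
  | [], picked => picked
  | m :: rest, picked =>
    let picked' := picked ++ [trunc80 m]
    if (picked'.length : Int) = n then picked' else pickLoopC n rest picked'

-- what the dict keeps per key: longest, earliest on ties
def pickRep (o : Option (String × Int)) (p : String × Int) : Option (String × Int) :=
  match o with
  | none => some p
  | some c => if PySem.Str.len c.1 < PySem.Str.len p.1 then some p else some c

-- bestStep re-indexed on (message, index) pairs
def bestStep' (d : PySem.Dict String (String × Int)) (p : String × Int) :
    PySem.Dict String (String × Int) :=
  match d.get? (normKey p.1) with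
  | none => d.insert (normKey p.1) p
  | some cur => if PySem.Str.len cur.1 < PySem.Str.len p.1 then d.insert (normKey p.1) p else d

-- p is the representative of its key class: in P, and keyI-below every other class member
def MinCl (messages : List String) (p : String × Int) : Prop :=
  p ∈ pairsP messages ∧ ∀ q ∈ pairsP messages, normKey q.1 = normKey p.1 → q.2 ≠ p.2 →
    keyI (messages.length : Int) p < keyI (messages.length : Int) q

theorem enum_cons (m : String) (t : List String) (s : Int) :
    PySem.List.enumerate (m :: t) s = (s, m) :: PySem.List.enumerate t (s + 1) := rfl

theorem keyI_lt_iff (N : Int) (p q : String × Int)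
    (hp0 : 0 ≤ p.2) (hpN : p.2 ≤ N) (hq0 : 0 ≤ q.2) (hqN : q.2 ≤ N) :
    keyI N p < keyI N q ↔
      (PySem.Str.len q.1 < PySem.Str.len p.1 ∨
        (PySem.Str.len p.1 = PySem.Str.len q.1 ∧ p.2 < q.2)) := by
  unfold keyI
  set a := PySem.Str.len p.1 with ha
  set b := PySem.Str.len q.1 with hb
  rcases lt_trichotomy a b with h|h|h
  · have h1 : (a + 1) * (N + 1) ≤ b * (N + 1) :=
      mul_le_mul_of_nonneg_right (by omega) (by omega)
    constructor
    · intro hlt; exfalso; nlinarith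
    · rintro (h'|⟨h',_⟩) <;> omega
  · rw [h]; constructor
    · intro hlt; right; exact ⟨rfl, by nlinarith⟩
    · rintro (h'|⟨_,h'⟩)
      · omega
      · nlinarith
  · have h1 : (b + 1) * (N + 1) ≤ a * (N + 1) :=
      mul_le_mul_of_nonneg_right (by omega) (by omega)
    constructor
    · intro _; left; exact h
    · intro _; nlinarith

theorem keyI_inj (N : Int) (p q : String × Int)
    (hp0 : 0 ≤ p.2) (hpN : p.2 ≤ N) (hq0 : 0 ≤ q.2) (hqN : q.2 ≤ N)
    (h : keyI N p = keyI N q) : PySem.Str.len p.1 = PySem.Str.len q.1 ∧ p.2 = q.2 := by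
  have h1 := keyI_lt_iff N p q hp0 hpN hq0 hqN
  have h2 := keyI_lt_iff N q p hq0 hqN hp0 hpN
  constructor
  · by_contra hne
    rcases lt_trichotomy (PySem.Str.len p.1) (PySem.Str.len q.1) with hh|hh|hh
    · have := h2.mpr (Or.inl hh); omega
    · exact hne hh
    · have := h1.mpr (Or.inl hh); omega
  · by_contra hne
    rcases lt_trichotomy p.2 q.2 with hh|hh|hh
    · rcases lt_trichotomy (PySem.Str.len p.1) (PySem.Str.len q.1) with hl|hl|hl
      · have := h2.mpr (Or.inl hl); omega
      · have := h1.mpr (Or.inr ⟨hl, hh⟩); omega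
      · have := h1.mpr (Or.inl hl); omega
    · exact hne hh
    · rcases lt_trichotomy (PySem.Str.len p.1) (PySem.Str.len q.1) with hl|hl|hl
      · have := h2.mpr (Or.inl hl); omega
      · have := h2.mpr (Or.inr ⟨hl.symm, hh⟩); omega
      · have := h1.mpr (Or.inl hl); omega

theorem c2_eq_cK (N : Int) (p q : String × Int)
    (hp0 : 0 ≤ p.2) (hpN : p.2 ≤ N) (hq0 : 0 ≤ q.2) (hqN : q.2 ≤ N) :
    c2 p q = cK N p q := by
  have h1 := keyI_lt_iff N p q hp0 hpN hq0 hqN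
  unfold c2 cK
  rw [decide_eq_decide.mpr h1, Bool.eq_iff_iff]
  simp only [Bool.or_eq_true, Bool.and_eq_true, Bool.not_eq_true',
    decide_eq_true_eq, decide_eq_false_iff_not]
  · omega
  · infer_instance

theorem enum_bounds : ∀ (ms : List String) (s : Int), ∀ e ∈ PySem.List.enumerate ms s,
    s ≤ e.1 ∧ e.1 < s + ms.length := by
  intro ms
  induction ms with
  | nil => intro s e he; simp [PySem.List.enumerate] at he
  | cons m t ih =>
    intro s e he
    rw [enum_cons] at he
    rcases List.mem_cons.mp he with h | h
    · subst h; simp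
    · have := ih (s + 1) e h; simp at this ⊢; omega

theorem enum_pairwise : ∀ (ms : List String) (s : Int),
    (PySem.List.enumerate ms s).Pairwise (fun a b => a.1 < b.1) := by
  intro ms
  induction ms with
  | nil => intro s; simp [PySem.List.enumerate]
  | cons m t ih =>
    intro s
    rw [enum_cons]
    refine List.pairwise_cons.mpr ⟨?_, ih (s + 1)⟩
    intro e he
    have := enum_bounds t (s + 1) e he
    simp; omega

theorem pairsP_bounds (messages : List String) :
    ∀ p ∈ pairsP messages, 0 ≤ p.2 ∧ p.2 < (messages.length : Int) := by
  intro p hp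
  rcases List.mem_map.mp hp with ⟨e, he, rfl⟩
  have := enum_bounds messages 0 e he
  simp at this ⊢; omega

theorem pairsP_idx_pairwise (messages : List String) :
    (pairsP messages).Pairwise (fun p q => p.2 < q.2) := by
  exact (List.pairwise_map).mpr (enum_pairwise messages 0)

theorem pairsP_idx_inj (messages : List String) {p q : String × Int}
    (hp : p ∈ pairsP messages) (hq : q ∈ pairsP messages) (h : p.2 = q.2) : p = q := by
  have hpw : (pairsP messages).Pairwise (fun p q => p.2 ≠ q.2) :=
    (pairsP_idx_pairwise messages).imp (fun h => by omega)
  by_contra hne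
  have hsym : Symmetric (fun p q : String × Int => p.2 ≠ q.2) := fun a b h => h.symm
  exact (hpw.forall hsym hp hq hne) h

theorem cK_step (N s : Int) (m : String) (q : String × Int)
    (hs0 : 0 ≤ s) (hsN : s ≤ N) (hq0 : 0 ≤ q.2) (hqs : q.2 < s) :
    cK N (m, s) q = cRev m q.1 := by
  unfold cK cRev
  rw [decide_eq_decide.mpr (keyI_lt_iff N (m, s) q hs0 hsN hq0 (by omega)), decide_eq_decide]
  · constructor
    · rintro (h | ⟨_, h⟩)
      · exact h
      · simp at h; omega
    · intro h; exact Or.inl h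
  · infer_instance

theorem insertBy_map_fst (N s : Int) (m : String) :
    ∀ (acc : List (String × Int)), 0 ≤ s → s ≤ N → (∀ q ∈ acc, 0 ≤ q.2 ∧ q.2 < s) →
    (PySem.List.insertBy (cK N) (m, s) acc).map Prod.fst =
      PySem.List.insertBy cRev m (acc.map Prod.fst) := by
  intro acc
  induction acc with
  | nil => intro _ _ _; simp [PySem.List.insertBy]
  | cons q t ih =>
    intro hs0 hsN hb
    have hq := hb q (by simp)
    have hck : cK N (m, s) q = cRev m q.1 := cK_step N s m q hs0 hsN hq.1 hq.2
    simp only [PySem.List.insertBy, List.map_cons]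
    rw [hck]
    by_cases h : cRev m q.1 = true
    · simp [h]
    · simp only [h, Bool.false_eq_true, if_false, List.map_cons]
      rw [ih hs0 hsN (fun r hr => hb r (by simp [hr]))]

theorem foldP_spec (N : Int) :
    ∀ (ms : List String) (s : Int) (acc : List (String × Int)),
    0 ≤ s → s + (ms.length : Int) ≤ N + 1 → (∀ q ∈ acc, 0 ≤ q.2 ∧ q.2 < s) →
    ((((PySem.List.enumerate ms s).map (fun e => (e.2, e.1))).foldl
        (fun a x => PySem.List.insertBy (cK N) x a) acc).map Prod.fst =
      ms.foldl (fun a x => PySem.List.insertBy cRev x a) (acc.map Prod.fst)) ∧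
    (∀ q ∈ ((PySem.List.enumerate ms s).map (fun e => (e.2, e.1))).foldl
        (fun a x => PySem.List.insertBy (cK N) x a) acc, 0 ≤ q.2 ∧ q.2 < s + ms.length) := by
  intro ms
  induction ms with
  | nil => intro s acc _ _ hb; constructor
           · simp [PySem.List.enumerate]
           · simpa [PySem.List.enumerate] using fun q hq => (hb q hq)
  | cons m t ih =>
    intro s acc hs0 hsN hb
    rw [List.length_cons] at hsN
    push_cast at hsN
    rw [enum_cons]
    simp only [List.map_cons, List.foldl_cons, List.length_cons]
    have hacc' : ∀ q ∈ PySem.List.insertBy (cK N) (m, s) acc, 0 ≤ q.2 ∧ q.2 < s + 1 := by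
      intro q hq
      rcases (PySem.List.mem_insertBy (cK N) (m, s) q acc).mp hq with rfl | hq'
      · simp; omega
      · have := hb q hq'; omega
    have hsN' : s + 1 + (t.length : Int) ≤ N + 1 := by omega
    obtain ⟨ih1, ih2⟩ := ih (s + 1) (PySem.List.insertBy (cK N) (m, s) acc) (by omega) hsN' hacc'
    constructor
    · rw [ih1, insertBy_map_fst N s m acc hs0 (by omega) hb]
    · intro q hq; have := ih2 q hq; constructor
      · exact this.1
      · push_cast at this ⊢; omega

theorem ranked_eq (messages : List String) :
    PySem.List.sorted messages (fun m => PySem.Str.len m) true =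
      (PySem.List.sorted (pairsP messages) (keyI (messages.length : Int)) false).map Prod.fst := by
  have hA := PySem.List.sorted_rev_eq_foldl_insertBy messages (fun m => PySem.Str.len m)
  have hP := PySem.List.sorted_eq_foldl_insertBy (pairsP messages) (keyI (messages.length : Int))
  rw [hA, hP]
  have h := (foldP_spec (messages.length : Int) messages 0 [] (by omega) (by omega)
    (by intro q hq; simp at hq)).1
  exact h.symm

theorem pairsP_nodup (messages : List String) : (pairsP messages).Nodup :=
  (pairsP_idx_pairwise messages).imp (fun h => by intro he; subst he; omega)

theorem S_nodup (messages : List String) :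
    (PySem.List.sorted (pairsP messages) (keyI (messages.length : Int)) false).Nodup :=
  (PySem.List.sorted_perm (pairsP messages) (keyI (messages.length : Int)) false).nodup_iff.mpr
    (pairsP_nodup messages)

theorem S_pairwise_lt (messages : List String) :
    (PySem.List.sorted (pairsP messages) (keyI (messages.length : Int)) false).Pairwise
      (fun p q => keyI (messages.length : Int) p < keyI (messages.length : Int) q) := by
  have hle := PySem.List.sorted_pairwise (pairsP messages) (keyI (messages.length : Int))
  have hnd : (PySem.List.sorted (pairsP messages) (keyI (messages.length : Int)) false).Nodup :=
    S_nodup messages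
  have hcomb := hle.and hnd
  refine hcomb.imp_of_mem ?_
  intro p q hp hq ⟨hle', hne⟩
  have hmem : ∀ r, r ∈ PySem.List.sorted (pairsP messages) (keyI (messages.length : Int)) false →
      r ∈ pairsP messages := fun r hr =>
    (PySem.List.sorted_perm (pairsP messages) (keyI (messages.length : Int)) false).mem_iff.mp hr
  have hpP := hmem p hp
  have hqP := hmem q hq
  have hpb := pairsP_bounds messages p hpP
  have hqb := pairsP_bounds messages q hqP
  rcases lt_or_eq_of_le hle' with h | h
  · exact h
  · exfalso
    have := keyI_inj (messages.length : Int) p q hpb.1 (by omega) hqb.1 (by omega) h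
    exact hne (pairsP_idx_inj messages hpP hqP this.2)

theorem contains_iff (s : PySem.Set String) (x : String) :
    PySem.Set.contains s x = true ↔ x ∈ s := by simp [PySem.Set.contains]

theorem dedupP_sublist (seen : PySem.Set String) :
    ∀ l : List (String × Int), (dedupP seen l).Sublist l := by
  intro l
  induction l generalizing seen with
  | nil => simp [dedupP]
  | cons p t ih =>
    rw [dedupP]
    by_cases h : PySem.Set.contains seen (normKey p.1)
    · simp only [h, if_true]; exact (ih seen).cons p
    · simp only [h, Bool.false_eq_true, if_false]
      exact (ih (PySem.Set.add seen (normKey p.1))).cons₂ p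

theorem dedupP_map_fst : ∀ (l : List (String × Int)) (seen : PySem.Set String),
    (dedupP seen l).map Prod.fst = firstOccs seen (l.map Prod.fst) := by
  intro l
  induction l with
  | nil => intro seen; simp [dedupP, firstOccs]
  | cons p t ih =>
    intro seen
    rw [dedupP, List.map_cons, firstOccs]
    by_cases h : PySem.Set.contains seen (normKey p.1)
    · simp only [h, if_true]; exact ih seen
    · simp only [h, Bool.false_eq_true, if_false, List.map_cons]
      rw [ih (PySem.Set.add seen (normKey p.1))]

theorem mem_dedupP : ∀ (l : List (String × Int)) (seen : PySem.Set String) (p : String × Int),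
    p ∈ dedupP seen l ↔ ∃ l1 l2, l = l1 ++ p :: l2 ∧ normKey p.1 ∉ seen ∧
      ∀ q ∈ l1, normKey q.1 ≠ normKey p.1 := by
  intro l
  induction l with
  | nil =>
    intro seen p
    simp [dedupP]
  | cons h t ih =>
    intro seen p
    rw [dedupP]
    by_cases hc : PySem.Set.contains seen (normKey h.1)
    · simp only [hc, if_true]
      rw [ih seen p]
      constructor
      · rintro ⟨l1, l2, rfl, hns, hl1⟩
        refine ⟨h :: l1, l2, rfl, hns, ?_⟩
        intro q hq
        rcases List.mem_cons.mp hq with rfl | hq'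
        · intro he
          exact hns (by rw [← he]; exact (contains_iff seen (normKey q.1)).mp hc)
        · exact hl1 q hq'
      · rintro ⟨l1, l2, heq, hns, hl1⟩
        cases l1 with
        | nil =>
          simp at heq
          obtain ⟨rfl, rfl⟩ := heq
          exact absurd ((contains_iff _ _).mp hc) hns
        | cons a l1' =>
          simp at heq
          obtain ⟨rfl, heq'⟩ := heq
          exact ⟨l1', l2, heq', hns, fun q hq => hl1 q (List.mem_cons_of_mem _ hq)⟩
    · rw [if_neg hc]
      simp only [List.mem_cons]
      constructor
      · rintro (rfl | hp)
        · exact ⟨[], t, rfl, fun hm => hc ((contains_iff _ _).mpr hm), by simp⟩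
        · obtain ⟨l1, l2, rfl, hns, hl1⟩ := (ih _ p).mp hp
          have hne : normKey p.1 ≠ normKey h.1 := by
            intro he
            exact hns (by rw [PySem.Set.mem_add]; right; exact he)
          have hns' : normKey p.1 ∉ seen := by
            intro hm
            exact hns (by rw [PySem.Set.mem_add]; left; exact hm)
          exact ⟨h :: l1, l2, rfl, hns', by
            intro q hq
            rcases List.mem_cons.mp hq with rfl | hq'
            · exact fun he => hne he.symm
            · exact hl1 q hq'⟩
      · rintro ⟨l1, l2, heq, hns, hl1⟩
        cases l1 with
        | nil =>
          simp at heq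
          left; exact heq.1.symm
        | cons a l1' =>
          simp at heq
          obtain ⟨rfl, heq'⟩ := heq
          right
          refine (ih _ p).mpr ⟨l1', l2, heq', ?_, fun q hq => hl1 q (List.mem_cons_of_mem _ hq)⟩
          rw [PySem.Set.mem_add]
          rintro (hm | he)
          · exact hns hm
          · exact hl1 h (by simp) he.symm

theorem mem_dedupP_iff_MinCl (messages : List String) (p : String × Int) :
    p ∈ dedupP PySem.Set.empty
        (PySem.List.sorted (pairsP messages) (keyI (messages.length : Int)) false) ↔
      MinCl messages p := by
  set N := (messages.length : Int) with hN
  set S := PySem.List.sorted (pairsP messages) (keyI N) false with hS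
  have hperm := PySem.List.sorted_perm (pairsP messages) (keyI N) false
  have hpw : S.Pairwise (fun p q => keyI N p < keyI N q) := S_pairwise_lt messages
  rw [mem_dedupP]
  constructor
  · rintro ⟨l1, l2, heq, _, hl1⟩
    have hpS : p ∈ S := by rw [heq]; simp
    have hpP : p ∈ pairsP messages := hperm.mem_iff.mp hpS
    refine ⟨hpP, ?_⟩
    intro q hqP hkey hq2
    have hqS : q ∈ S := hperm.mem_iff.mpr hqP
    rw [heq] at hqS hpw
    rcases List.mem_append.mp hqS with hq1 | hq'
    · exact absurd hkey (hl1 q hq1)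
    · rcases List.mem_cons.mp hq' with rfl | hq2'
      · omega
      · have := (List.pairwise_append.mp hpw).2.1
        exact (List.pairwise_cons.mp this).1 q hq2'
  · rintro ⟨hpP, hmin⟩
    have hpS : p ∈ S := hperm.mem_iff.mpr hpP
    obtain ⟨l1, l2, heq⟩ := List.append_of_mem hpS
    refine ⟨l1, l2, heq, by simp [PySem.Set.empty], ?_⟩
    intro q hq1 hkey
    have hqS : q ∈ S := by rw [heq]; simp [hq1]
    have hqP : q ∈ pairsP messages := hperm.mem_iff.mp hqS
    rw [heq] at hpw
    have hlt : keyI N q < keyI N p := by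
      have := (List.pairwise_append.mp hpw).2.2
      exact this q hq1 p (by simp)
    by_cases h2 : q.2 = p.2
    · have : q = p := pairsP_idx_inj messages hqP hpP h2
      subst this; omega
    · have := hmin q hqP hkey h2
      rw [← hN] at this
      omega

theorem bestStep'_none (d : PySem.Dict String (String × Int)) (p : String × Int)
    (hg : d.get? (normKey p.1) = none) : bestStep' d p = d.insert (normKey p.1) p := by
  unfold bestStep'; rw [hg]

theorem bestStep'_lt (d : PySem.Dict String (String × Int)) (p cur : String × Int)
    (hg : d.get? (normKey p.1) = some cur) (hlt : PySem.Str.len cur.1 < PySem.Str.len p.1) :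
    bestStep' d p = d.insert (normKey p.1) p := by
  unfold bestStep'; rw [hg]; exact if_pos hlt

theorem bestStep'_ge (d : PySem.Dict String (String × Int)) (p cur : String × Int)
    (hg : d.get? (normKey p.1) = some cur) (hlt : ¬ PySem.Str.len cur.1 < PySem.Str.len p.1) :
    bestStep' d p = d := by
  unfold bestStep'; rw [hg]; exact if_neg hlt

theorem bestFold_eq (messages : List String) :
    (PySem.List.enumerate messages).foldl bestStep PySem.Dict.empty =
      (pairsP messages).foldl bestStep' PySem.Dict.empty := by
  rw [pairsP, List.foldl_map]
  rfl

theorem bestFold_get? : ∀ (l : List (String × Int)) (d : PySem.Dict String (String × Int))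
    (k0 : String),
    ((l.foldl bestStep' d).get? k0) =
      (l.filter (fun p => normKey p.1 == k0)).foldl pickRep (d.get? k0) := by
  intro l
  induction l with
  | nil => intro d k0; simp
  | cons p t ih =>
    intro d k0
    rw [List.foldl_cons, ih]
    by_cases hk : normKey p.1 = k0
    · subst hk
      rw [List.filter_cons_of_pos (by simp), List.foldl_cons]
      congr 1
      cases hg : d.get? (normKey p.1) with
      | none =>
        rw [bestStep'_none d p hg, PySem.Dict.get?_insert_self]
        rfl
      | some cur =>
        by_cases hlt : PySem.Str.len cur.1 < PySem.Str.len p.1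
        · rw [bestStep'_lt d p cur hg hlt, PySem.Dict.get?_insert_self]
          show _ = if PySem.Str.len cur.1 < PySem.Str.len p.1 then some p else some cur
          rw [if_pos hlt]
        · rw [bestStep'_ge d p cur hg hlt, hg]
          show _ = if PySem.Str.len cur.1 < PySem.Str.len p.1 then some p else some cur
          rw [if_neg hlt]
    · rw [List.filter_cons_of_neg (by simp [hk])]
      congr 1
      cases hg : d.get? (normKey p.1) with
      | none => rw [bestStep'_none d p hg]; exact PySem.Dict.get?_insert_of_ne d _ (Ne.symm hk)
      | some cur =>
        by_cases hlt : PySem.Str.len cur.1 < PySem.Str.len p.1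
        · rw [bestStep'_lt d p cur hg hlt]; exact PySem.Dict.get?_insert_of_ne d _ (Ne.symm hk)
        · rw [bestStep'_ge d p cur hg hlt]

theorem bestFold_nodup_keys : ∀ (l : List (String × Int)) (d : PySem.Dict String (String × Int)),
    d.keys.Nodup → (l.foldl bestStep' d).keys.Nodup := by
  intro l
  induction l with
  | nil => intro d h; exact h
  | cons p t ih =>
    intro d h
    rw [List.foldl_cons]
    refine ih _ ?_
    cases hg : d.get? (normKey p.1) with
    | none => rw [bestStep'_none d p hg]; exact PySem.Dict.nodup_keys_insert d _ _ h
    | some cur =>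
      by_cases hlt : PySem.Str.len cur.1 < PySem.Str.len p.1
      · rw [bestStep'_lt d p cur hg hlt]; exact PySem.Dict.nodup_keys_insert d _ _ h
      · rwa [bestStep'_ge d p cur hg hlt]

theorem bestFold_items_key : ∀ (l : List (String × Int)) (d : PySem.Dict String (String × Int)),
    (∀ kv ∈ d.items, normKey kv.2.1 = kv.1) →
    ∀ kv ∈ (l.foldl bestStep' d).items, normKey kv.2.1 = kv.1 := by
  intro l
  induction l with
  | nil => intro d h; exact h
  | cons p t ih =>
    intro d h
    rw [List.foldl_cons]
    refine ih _ ?_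
    have hins : ∀ kv, kv ∈ (d.insert (normKey p.1) p).items → normKey kv.2.1 = kv.1 := by
      intro kv hkv
      rcases (PySem.Dict.mem_items_insert d _ _ kv).mp hkv with rfl | ⟨hold, _⟩
      · rfl
      · exact h kv hold
    cases hg : d.get? (normKey p.1) with
    | none => rw [bestStep'_none d p hg]; exact hins
    | some cur =>
      by_cases hlt : PySem.Str.len cur.1 < PySem.Str.len p.1
      · rw [bestStep'_lt d p cur hg hlt]; exact hins
      · rw [bestStep'_ge d p cur hg hlt]; exact h

theorem pickRep_min (N : Int) :
    ∀ (cl : List (String × Int)) (c : String × Int),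
    (∀ q ∈ cl, c.2 < q.2) → cl.Pairwise (fun p q => p.2 < q.2) →
    (∀ q ∈ c :: cl, 0 ≤ q.2 ∧ q.2 ≤ N) →
    ∃ m, cl.foldl pickRep (some c) = some m ∧ m ∈ c :: cl ∧
      ∀ q ∈ c :: cl, q.2 ≠ m.2 → keyI N m < keyI N q := by
  intro cl
  induction cl with
  | nil =>
    intro c _ _ _
    exact ⟨c, rfl, by simp, by
      intro q hq hne
      simp at hq; subst hq; omega⟩
  | cons q cl' ih =>
    intro c hcq hpw hb
    have hcq' : c.2 < q.2 := hcq q (by simp)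
    have hbc := hb c (by simp)
    have hbq := hb q (by simp)
    have hpw' := List.pairwise_cons.mp hpw
    by_cases hl : PySem.Str.len c.1 < PySem.Str.len q.1
    · -- the head q replaces c
      have hstep : List.foldl pickRep (some c) (q :: cl') = List.foldl pickRep (some q) cl' := by
        rw [List.foldl_cons]
        congr 1
        show (if PySem.Str.len c.1 < PySem.Str.len q.1 then some q else some c) = some q
        rw [if_pos hl]
      have holt : keyI N q < keyI N c :=
        (keyI_lt_iff N q c hbq.1 hbq.2 hbc.1 hbc.2).mpr (Or.inl hl)
      obtain ⟨m, hm1, hm2, hm3⟩ := ih q hpw'.1 hpw'.2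
        (fun r hr => hb r (by simp at hr ⊢; tauto))
      refine ⟨m, by rw [hstep]; exact hm1, by simp at hm2 ⊢; tauto, ?_⟩
      intro r hr hrne
      rcases List.mem_cons.mp hr with rfl | hr'
      · have hmq : keyI N m ≤ keyI N q := by
          rcases List.mem_cons.mp hm2 with rfl | hm'
          · omega
          · exact le_of_lt (hm3 q (by simp) (by have := hpw'.1 m hm'; omega))
        omega
      · exact hm3 r hr' hrne
    · -- c stays
      have hstep : List.foldl pickRep (some c) (q :: cl') = List.foldl pickRep (some c) cl' := by
        rw [List.foldl_cons]
        congr 1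
        show (if PySem.Str.len c.1 < PySem.Str.len q.1 then some q else some c) = some c
        rw [if_neg hl]
      have holt : keyI N c < keyI N q := by
        rcases lt_or_eq_of_le (le_of_not_gt hl) with h | h
        · exact (keyI_lt_iff N c q hbc.1 hbc.2 hbq.1 hbq.2).mpr (Or.inl h)
        · exact (keyI_lt_iff N c q hbc.1 hbc.2 hbq.1 hbq.2).mpr (Or.inr ⟨h.symm, hcq'⟩)
      obtain ⟨m, hm1, hm2, hm3⟩ := ih c
        (fun r hr => lt_trans hcq' (hpw'.1 r hr)) hpw'.2
        (fun r hr => hb r (by simp at hr ⊢; tauto))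
      refine ⟨m, by rw [hstep]; exact hm1, by simp at hm2 ⊢; tauto, ?_⟩
      intro r hr hrne
      rcases List.mem_cons.mp hr with rfl | hr'
      · exact hm3 r (by simp) hrne
      · rcases List.mem_cons.mp hr' with rfl | hr''
        · have hmc : keyI N m ≤ keyI N c := by
            rcases List.mem_cons.mp hm2 with rfl | hm'
            · omega
            · exact le_of_lt (hm3 c (by simp) (by have := lt_trans hcq' (hpw'.1 m hm'); omega))
          omega
        · exact hm3 r (by simp [hr'']) hrne

theorem bestFold_class_min (messages : List String) (k0 : String)
    (cl : List (String × Int)) (c : String × Int)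
    (hcl : (pairsP messages).filter (fun p => normKey p.1 == k0) = c :: cl) :
    ∃ m, ((pairsP messages).foldl bestStep' PySem.Dict.empty).get? k0 = some m ∧
      m ∈ c :: cl ∧ ∀ q ∈ c :: cl, q.2 ≠ m.2 → keyI (messages.length : Int) m < keyI (messages.length : Int) q := by
  have hsub : (c :: cl).Sublist (pairsP messages) := by
    rw [← hcl]; exact List.filter_sublist
  have hpw : (c :: cl).Pairwise (fun p q => p.2 < q.2) :=
    (pairsP_idx_pairwise messages).sublist hsub
  have hb : ∀ q ∈ c :: cl, 0 ≤ q.2 ∧ q.2 ≤ (messages.length : Int) := by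
    intro q hq
    have := pairsP_bounds messages q (hsub.mem hq)
    omega
  have hpc := List.pairwise_cons.mp hpw
  obtain ⟨m, hm1, hm2, hm3⟩ := pickRep_min (messages.length : Int) cl c hpc.1 hpc.2 hb
  refine ⟨m, ?_, hm2, hm3⟩
  rw [bestFold_get?, hcl]
  simpa using hm1

theorem mem_values_iff_MinCl (messages : List String) (p : String × Int) :
    p ∈ ((pairsP messages).foldl bestStep' PySem.Dict.empty).values ↔ MinCl messages p := by
  set d := (pairsP messages).foldl bestStep' PySem.Dict.empty with hd
  have hnd : d.keys.Nodup := bestFold_nodup_keys _ _ (by simp [PySem.Dict.empty])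
  have hval : p ∈ d.values ↔ ∃ k0, d.get? k0 = some p := by
    constructor
    · intro hp
      rcases List.mem_map.mp hp with ⟨kv, hkv, hkv2⟩
      exact ⟨kv.1, (PySem.Dict.get?_eq_some_iff_mem_items d kv.1 p hnd).mpr
        (by rw [← hkv2]; exact hkv)⟩
    · rintro ⟨k0, hk0⟩
      have := (PySem.Dict.get?_eq_some_iff_mem_items d k0 p hnd).mp hk0
      exact List.mem_map.mpr ⟨(k0, p), this, rfl⟩
  rw [hval]
  constructor
  · rintro ⟨k0, hk0⟩
    cases hcl : (pairsP messages).filter (fun q => normKey q.1 == k0) with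
    | nil =>
      exfalso
      rw [hd] at hk0
      rw [bestFold_get?, hcl] at hk0
      simp at hk0
    | cons c cl =>
      obtain ⟨m, hm1, hm2, hm3⟩ := bestFold_class_min messages k0 cl c hcl
      rw [← hd] at hm1
      rw [hk0] at hm1
      obtain rfl : p = m := by injection hm1
      have hpcl : p ∈ (pairsP messages).filter (fun q => normKey q.1 == k0) := by
        rw [hcl]; exact hm2
      have hkey : normKey p.1 = k0 := by
        have := List.of_mem_filter hpcl
        simpa using this
      have hpP : p ∈ pairsP messages := List.mem_of_mem_filter hpcl
      refine ⟨hpP, ?_⟩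
      intro q hq hqkey hq2
      have hqcl : q ∈ c :: cl := by
        rw [← hcl]
        exact List.mem_filter.mpr ⟨hq, by simp [hqkey, hkey]⟩
      exact hm3 q hqcl hq2
  · rintro ⟨hpP, hmin⟩
    refine ⟨normKey p.1, ?_⟩
    have hpcl : p ∈ (pairsP messages).filter (fun q => normKey q.1 == normKey p.1) :=
      List.mem_filter.mpr ⟨hpP, by simp⟩
    cases hcl : (pairsP messages).filter (fun q => normKey q.1 == normKey p.1) with
    | nil => rw [hcl] at hpcl; simp at hpcl
    | cons c cl =>
      obtain ⟨m, hm1, hm2, hm3⟩ := bestFold_class_min messages (normKey p.1) cl c hcl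
      rw [← hd] at hm1
      rw [hm1]
      have hmcl : m ∈ (pairsP messages).filter (fun q => normKey q.1 == normKey p.1) := by
        rw [hcl]; exact hm2
      have hmP : m ∈ pairsP messages := List.mem_of_mem_filter hmcl
      have hmkey : normKey m.1 = normKey p.1 := by
        have := List.of_mem_filter hmcl
        simpa using this
      by_cases h2 : m.2 = p.2
      · rw [pairsP_idx_inj messages hmP hpP h2]
      · exfalso
        have h1 := hmin m hmP hmkey h2
        have hpcl' : p ∈ c :: cl := by rw [← hcl]; exact hpcl
        have h3 := hm3 p hpcl' (fun h => h2 h.symm)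
        omega

theorem values_nodup (messages : List String) :
    ((pairsP messages).foldl bestStep' PySem.Dict.empty).values.Nodup := by
  set d := (pairsP messages).foldl bestStep' PySem.Dict.empty with hd
  have hnd : d.keys.Nodup := bestFold_nodup_keys _ _ (by simp [PySem.Dict.empty])
  have hitems : d.items.Nodup := hnd.of_map _
  have hkey : ∀ kv ∈ d.items, normKey kv.2.1 = kv.1 :=
    bestFold_items_key _ _ (by simp [PySem.Dict.empty])
  refine hitems.map_on ?_
  intro kv hkv kv' hkv' heq
  have h1 := hkey kv hkv
  have h2 := hkey kv' hkv'
  have : kv.1 = kv'.1 := by rw [← h1, ← h2, heq]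
  exact Prod.ext this heq

theorem insertBy_congr {α : Type} (c c' : α → α → Bool) (x : α) :
    ∀ (l : List α), (∀ y ∈ l, c x y = c' x y) →
    PySem.List.insertBy c x l = PySem.List.insertBy c' x l := by
  intro l
  induction l with
  | nil => intro _; rfl
  | cons y t ih =>
    intro h
    unfold PySem.List.insertBy
    rw [h y (by simp)]
    by_cases hy : c' x y = true
    · rw [if_pos hy, if_pos hy]
    · rw [if_neg hy, if_neg hy, ih (fun z hz => h z (by simp [hz]))]

theorem foldl_insertBy_congr {α : Type} (c c' : α → α → Bool) (U : List α)
    (h : ∀ x ∈ U, ∀ y ∈ U, c x y = c' x y) :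
    ∀ (l acc : List α), (∀ x ∈ l, x ∈ U) → (∀ y ∈ acc, y ∈ U) →
    l.foldl (fun a x => PySem.List.insertBy c x a) acc =
      l.foldl (fun a x => PySem.List.insertBy c' x a) acc := by
  intro l
  induction l with
  | nil => intro acc _ _; rfl
  | cons x t ih =>
    intro acc hl hacc
    have hx : x ∈ U := hl x (by simp)
    rw [List.foldl_cons, List.foldl_cons,
      insertBy_congr c c' x acc (fun y hy => h x hx y (hacc y hy))]
    exact ih _ (fun z hz => hl z (by simp [hz]))
      (fun y hy => by
        rcases (PySem.List.mem_insertBy c' x y acc).mp hy with rfl | hy'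
        · exact hx
        · exact hacc y hy')

theorem reps_eq (messages : List String) :
    PySem.List.sorted2 ((pairsP messages).foldl bestStep' PySem.Dict.empty).values
        (fun t => -(PySem.Str.len t.1)) (fun t => t.2) false =
      dedupP PySem.Set.empty
        (PySem.List.sorted (pairsP messages) (keyI (messages.length : Int)) false) := by
  set N := (messages.length : Int) with hN
  set V := ((pairsP messages).foldl bestStep' PySem.Dict.empty).values with hV
  set S := PySem.List.sorted (pairsP messages) (keyI N) false with hS
  set W := dedupP PySem.Set.empty S with hW
  -- step 1: sorted2 with comparator c2 is the fold, and on V it agrees with cK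
  have hVb : ∀ p ∈ V, 0 ≤ p.2 ∧ p.2 ≤ N := by
    intro p hp
    have := (mem_values_iff_MinCl messages p).mp hp
    have := pairsP_bounds messages p this.1
    omega
  have h1 : PySem.List.sorted2 V (fun t => -(PySem.Str.len t.1)) (fun t => t.2) false =
      V.foldl (fun a x => PySem.List.insertBy c2 x a) [] := rfl
  have h2 : V.foldl (fun a x => PySem.List.insertBy c2 x a) [] =
      V.foldl (fun a x => PySem.List.insertBy (cK N) x a) [] :=
    foldl_insertBy_congr c2 (cK N) V
      (fun x hx y hy => c2_eq_cK N x y (hVb x hx).1 (hVb x hx).2 (hVb y hy).1 (hVb y hy).2)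
      V [] (fun x hx => hx) (by simp)
  have h3 : V.foldl (fun a x => PySem.List.insertBy (cK N) x a) [] =
      PySem.List.sorted V (keyI N) false :=
    (PySem.List.sorted_eq_foldl_insertBy V (keyI N)).symm
  -- step 2: W is the strictly increasing permutation of V
  have hWnd : W.Nodup := (dedupP_sublist PySem.Set.empty S).nodup (S_nodup messages)
  have hVnd : V.Nodup := values_nodup messages
  have hperm : W.Perm V := (List.perm_ext_iff_of_nodup hWnd hVnd).mpr (fun p => by
    rw [hW, hV, hS, hN]
    rw [mem_dedupP_iff_MinCl messages p, mem_values_iff_MinCl messages p])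
  have hpw : W.Pairwise (fun p q => keyI N p < keyI N q) :=
    (S_pairwise_lt messages).sublist (dedupP_sublist PySem.Set.empty S)
  have h4 : PySem.List.sorted V (keyI N) false = W :=
    PySem.List.sorted_eq_of_perm_of_pairwise_lt V W (keyI N) hperm hpw
  rw [h1, h2, h3, h4]

theorem pickLoopB_eq_C (n : Int) : ∀ (ps : List (String × Int)) (picked : List String),
    pickLoopB n ps picked = pickLoopC n (ps.map Prod.fst) picked := by
  intro ps
  induction ps with
  | nil => intro picked; rfl
  | cons t rest ih =>
    intro picked
    rw [List.map_cons, pickLoopB, pickLoopC]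
    by_cases h : ((picked ++ [trunc80 t.1]).length : Int) = n
    · simp only [h, if_true]
    · simp only [h, if_false]; exact ih _

theorem pickLoopA_eq_C (n : Int) : ∀ (rest : List String) (seen : PySem.Set String)
    (picked : List String), ((picked.length : Int) = n → seen = ([] : List String)) →
    pickLoopA n rest seen picked = pickLoopC n (firstOccs seen rest) picked := by
  intro rest
  induction rest with
  | nil => intro seen picked _; rfl
  | cons m t ih =>
    intro seen picked hinv
    rw [pickLoopA, firstOccs]
    by_cases hc : PySem.Set.contains seen (normKey m) = true
    · -- duplicate: skipped
      rw [if_neg (show ¬(PySem.Set.contains seen (normKey m) = false) by rw [hc]; simp), if_pos hc]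
      by_cases hn : (picked.length : Int) = n
      · exfalso
        have := hinv hn
        rw [this] at hc
        simp [PySem.Set.contains] at hc
      · rw [if_neg hn]
        exact ih seen picked hinv
    · have hc' : PySem.Set.contains seen (normKey m) = false := by
        cases h : PySem.Set.contains seen (normKey m)
        · rfl
        · exact absurd h hc
      rw [if_pos hc', if_neg hc]
      show (if ((picked ++ [trunc80 m]).length : Int) = n then picked ++ [trunc80 m]
        else pickLoopA n t (PySem.Set.add seen (normKey m)) (picked ++ [trunc80 m])) =
        pickLoopC n (m :: firstOccs (PySem.Set.add seen (normKey m)) t) picked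
      rw [pickLoopC]
      by_cases hn : ((picked ++ [trunc80 m]).length : Int) = n
      · rw [if_pos hn, if_pos hn]
      · rw [if_neg hn, if_neg hn]
        exact ih _ _ (fun h => absurd h hn)

-- ===== VERDICT (by name: the statement is the Claim_ definition above) =====
theorem pick_samples_py_spec : Claim_equal_pick_samples_py := by
  intro messages n _
  show pick_samples_py messages n = pick_samples_py_alt messages n
  show pickLoopA n (PySem.List.sorted messages (fun m => PySem.Str.len m) true) PySem.Set.empty []
      = pickLoopB n (PySem.List.sorted2
          ((PySem.List.enumerate messages).foldl bestStep PySem.Dict.empty).values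
          (fun t => -(PySem.Str.len t.1)) (fun t => t.2) false) []
  rw [bestFold_eq, reps_eq, ranked_eq]
  rw [pickLoopA_eq_C n _ PySem.Set.empty [] (fun _ => rfl)]
  rw [← dedupP_map_fst, ← pickLoopB_eq_C]
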